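-- pv_equiv track=rewrite | github.com/Alturino/problem-solving | dumbell_weight.py | solve
-- ===== SOURCE A (Python) =====
-- from typing import List
--
-- def solve(plates: List[int]):
--     res = []
--     combination = []
--     left = []
--     right = []
--
--     def backtracking(start: int, leftSum: int, rightSum: int):
--         if left and right:
--             if leftSum == rightSum:
--                 combination.append(left.copy())
--                 combination.append(right.copy())
--                 res.append(combination.copy())
--                 combination.clear()
--                 return
--
--         if start >= len(plates):
--             return
--
--         for i in range(start, len(plates)):
--             left.append(plates[i])
--             backtracking(i + 1, leftSum + plates[i], rightSum)
--             left.pop()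
--
--             right.append(plates[i])
--             backtracking(i + 1, leftSum, rightSum + plates[i])
--             right.pop()
--
--     backtracking(0, 0, 0)
--     return res
-- ===== SOURCE B (Python) =====
-- from typing import List
--
-- def solve(plates: List[int]):
--     res = []
--     n = len(plates)
--     stack = [(0, [], [], 0, 0)]
--     while stack:
--         start, left, right, leftSum, rightSum = stack.pop()
--         if left and right and leftSum == rightSum:
--             res.append([left, right])
--             continue
--         if start >= n:
--             continue
--         children = []
--         for i in range(start, n):
--             children.append((i + 1, left + [plates[i]], right, leftSum + plates[i], rightSum))
--             children.append((i + 1, left, right + [plates[i]], leftSum, rightSum + plates[i]))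
--         children.reverse()
--         stack.extend(children)
--     return res
-- ===== Notes on version B (the rewrite author's own statement) =====
-- stated objective: alternative
-- what changed: Replaces the recursive backtracking (nested closure mutating shared left/right/combination lists) by an iterative DFS over an explicit stack of (start,left,right,leftSum,rightSum) frames, pushing children in reverse so A's pre-order and output order are reproduced exactly.
import Mathlib
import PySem

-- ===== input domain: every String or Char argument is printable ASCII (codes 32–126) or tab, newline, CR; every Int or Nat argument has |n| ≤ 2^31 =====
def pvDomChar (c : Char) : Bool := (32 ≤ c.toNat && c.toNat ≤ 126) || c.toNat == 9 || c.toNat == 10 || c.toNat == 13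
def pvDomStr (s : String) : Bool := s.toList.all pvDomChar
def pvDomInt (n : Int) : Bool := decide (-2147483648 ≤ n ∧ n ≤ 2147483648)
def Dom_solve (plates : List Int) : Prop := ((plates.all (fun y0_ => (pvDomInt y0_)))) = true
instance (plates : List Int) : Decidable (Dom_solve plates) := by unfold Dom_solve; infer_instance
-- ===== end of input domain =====

-- B replaces A's recursive backtracking by an explicit-stack iterative DFS (same pre-order,
-- same output); objective: alternative decomposition, same exponential cost.

-- ===== PORT A =====
-- A's nested 'backtracking' returns (as a list) the records it appends to res, in order;
-- the for-loop over range(start, n) is a foldl accumulating those records.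
def backtrackingA (plates : List Int) (start : Nat) (left right : List Int)
    (leftSum rightSum : Int) : List (List (List Int)) :=
  if left ≠ [] ∧ right ≠ [] ∧ leftSum = rightSum then [[left, right]]
  else if plates.length ≤ start then []
  else
    (List.range' start (plates.length - start)).attach.foldl
      (fun acc i =>
        acc ++ backtrackingA plates (i.1 + 1) (left ++ [plates.getD i.1 0]) right
                 (leftSum + plates.getD i.1 0) rightSum
            ++ backtrackingA plates (i.1 + 1) left (right ++ [plates.getD i.1 0])
                 leftSum (rightSum + plates.getD i.1 0)) []
termination_by plates.length - start
decreasing_by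
  all_goals
    have h := List.mem_range'_1.mp i.2
    omega

def solve (plates : List Int) : List (List (List Int)) :=
  backtrackingA plates 0 [] [] 0 0

-- ===== PORT B =====
-- one stack frame: (start, left, right, leftSum, rightSum); list head = top of stack
-- (Python's 'children.reverse(); stack.extend(children)' puts the ascending children list
--  on top with its first element popped next, i.e. head-first here).
-- The 'while stack' loop is made total with a fuel counter; solve_alt supplies enough fuel
-- (proved in the lemmas below), so the guard never fires on any input.
def runB (plates : List Int) :
    Nat → List (Nat × List Int × List Int × Int × Int) →
    List (List (List Int)) → List (List (List Int))
  | 0, _, res => res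
  | _ + 1, [], res => res
  | fuel + 1, (start, left, right, leftSum, rightSum) :: rest, res =>
    if left ≠ [] ∧ right ≠ [] ∧ leftSum = rightSum then
      runB plates fuel rest (res ++ [[left, right]])
    else if plates.length ≤ start then
      runB plates fuel rest res
    else
      runB plates fuel
        (((List.range' start (plates.length - start)).foldl
            (fun acc i =>
              acc ++ [(i + 1, left ++ [plates.getD i 0], right, leftSum + plates.getD i 0, rightSum),
                      (i + 1, left, right ++ [plates.getD i 0], leftSum, rightSum + plates.getD i 0)])
            []) ++ rest) res

def solve_alt (plates : List Int) : List (List (List Int)) :=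
  runB plates (3 ^ (plates.length + 1)) [(0, [], [], 0, 0)] []

-- ===== PRECONDITION & SPEC =====
def Spec_solve (plates : List Int) (out : List (List (List Int))) : Prop := out = solve_alt plates
instance (plates : List Int) (out : List (List (List Int))) : Decidable (Spec_solve plates out) := by unfold Spec_solve; infer_instance

-- ===== CLAIM (what is proved, stated in full; the proofs are below) =====
def Claim_equal_solve : Prop := ∀ (plates : List Int), Dom_solve plates → Spec_solve plates (solve plates)

-- ===== LEMMAS AND PROOFS =====

-- the recursive result a whole stack stands for
def stackVal (plates : List Int) (st : List (Nat × List Int × List Int × Int × Int)) :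
    List (List (List Int)) :=
  st.flatMap (fun f => backtrackingA plates f.1 f.2.1 f.2.2.1 f.2.2.2.1 f.2.2.2.2)

-- fuel measure: each frame at position start weighs 3^(n - start)
def stackW (n : Nat) (st : List (Nat × List Int × List Int × Int × Int)) : Nat :=
  (st.map (fun f => 3 ^ (n - f.1))).sum

-- the children block of one frame, as a flatMap over the index range
def childrenOf (plates : List Int) (start : Nat) (left right : List Int)
    (leftSum rightSum : Int) : List (Nat × List Int × List Int × Int × Int) :=
  (List.range' start (plates.length - start)).flatMap
    (fun i =>
      [(i + 1, left ++ [plates.getD i 0], right, leftSum + plates.getD i 0, rightSum),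
       (i + 1, left, right ++ [plates.getD i 0], leftSum, rightSum + plates.getD i 0)])

theorem pvFlatMapAssoc {a b c : Type} (l : List a) (g : a → List b) (h : b → List c) :
    (l.flatMap g).flatMap h = l.flatMap (fun x => (g x).flatMap h) := by
  induction l with
  | nil => simp
  | cons x t ih => simp [ih]

theorem backtrackingA_expand (plates : List Int) (start : Nat) (left right : List Int)
    (leftSum rightSum : Int)
    (hb : ¬ (left ≠ [] ∧ right ≠ [] ∧ leftSum = rightSum)) (hs : ¬ plates.length ≤ start) :
    backtrackingA plates start left right leftSum rightSum
      = stackVal plates (childrenOf plates start left right leftSum rightSum) := by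
  rw [backtrackingA, if_neg hb, if_neg hs]
  rw [List.foldl_attach
      (f := fun acc i =>
        acc ++ backtrackingA plates (i + 1) (left ++ [plates.getD i 0]) right
          (leftSum + plates.getD i 0) rightSum
        ++ backtrackingA plates (i + 1) left (right ++ [plates.getD i 0])
          leftSum (rightSum + plates.getD i 0))]
  have hbody : (fun (acc : List (List (List Int))) (i : Nat) =>
        acc ++ backtrackingA plates (i + 1) (left ++ [plates.getD i 0]) right
          (leftSum + plates.getD i 0) rightSum
        ++ backtrackingA plates (i + 1) left (right ++ [plates.getD i 0])
          leftSum (rightSum + plates.getD i 0))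
      = (fun acc i => acc ++
          (backtrackingA plates (i + 1) (left ++ [plates.getD i 0]) right
            (leftSum + plates.getD i 0) rightSum
          ++ backtrackingA plates (i + 1) left (right ++ [plates.getD i 0])
            leftSum (rightSum + plates.getD i 0))) := by
    funext acc i; rw [List.append_assoc]
  rw [hbody, PySem.List.foldl_append_eq_flatMap]
  simp only [stackVal, childrenOf, pvFlatMapAssoc]
  simp

theorem stackW_children (plates : List Int) :
    ∀ (k start : Nat) (left right : List Int) (leftSum rightSum : Int),
      start + k = plates.length →
      stackW plates.length
        ((List.range' start k).flatMap
          (fun i =>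
            [(i + 1, left ++ [plates.getD i 0], right, leftSum + plates.getD i 0, rightSum),
             (i + 1, left, right ++ [plates.getD i 0], leftSum, rightSum + plates.getD i 0)]))
        = 3 ^ k - 1 := by
  intro k
  induction k with
  | zero => intro start l r a b h; simp [stackW]
  | succ k ih =>
    intro start l r a b h
    have hr : List.range' start (k+1) = start :: List.range' (start+1) k := rfl
    rw [hr]
    simp only [List.flatMap_cons, stackW, List.map_append, List.sum_append]
    have := ih (start+1) l r a b (by omega)
    simp only [stackW] at this
    rw [this]
    have hn : plates.length - (start + 1) = k := by omega
    simp [hn, pow_succ]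
    have : 0 < 3 ^ k := Nat.pow_pos (by norm_num : (0:Nat) < 3)
    ring_nf
    omega

theorem runB_correct (plates : List Int) :
    ∀ (fuel : Nat) (st : List (Nat × List Int × List Int × Int × Int))
      (res : List (List (List Int))),
      stackW plates.length st ≤ fuel →
      runB plates fuel st res = res ++ stackVal plates st := by
  intro fuel
  induction fuel with
  | zero =>
    intro st res h
    cases st with
    | nil => simp [runB, stackVal]
    | cons f rest =>
      exfalso
      have hp : 0 < 3 ^ (plates.length - f.1) := Nat.pow_pos (by norm_num : (0:Nat) < 3)
      have he : stackW plates.length (f :: rest)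
          = 3 ^ (plates.length - f.1) + stackW plates.length rest := by
        simp [stackW]
      omega
  | succ fuel ih =>
    intro st res h
    cases st with
    | nil => simp [runB, stackVal]
    | cons f rest =>
      obtain ⟨start, left, right, leftSum, rightSum⟩ := f
      have hW : stackW plates.length ((start, left, right, leftSum, rightSum) :: rest)
          = 3 ^ (plates.length - start) + stackW plates.length rest := by
        simp [stackW]
      have hpos : 0 < 3 ^ (plates.length - start) := Nat.pow_pos (by norm_num : (0:Nat) < 3)
      rw [runB]
      by_cases hb : left ≠ [] ∧ right ≠ [] ∧ leftSum = rightSum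
      · rw [if_pos hb]
        rw [ih rest _ (by omega)]
        have : backtrackingA plates start left right leftSum rightSum = [[left, right]] := by
          rw [backtrackingA, if_pos hb]
        simp [stackVal, this, List.append_assoc]
      · rw [if_neg hb]
        by_cases hs : plates.length ≤ start
        · rw [if_pos hs]
          rw [ih rest _ (by omega)]
          have : backtrackingA plates start left right leftSum rightSum = [] := by
            rw [backtrackingA, if_neg hb, if_pos hs]
          simp [stackVal, this]
        · rw [if_neg hs]
          rw [PySem.List.foldl_append_eq_flatMap]
          have hch : ((List.range' start (plates.length - start)).flatMap
              (fun i =>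
                [(i + 1, left ++ [plates.getD i 0], right, leftSum + plates.getD i 0, rightSum),
                 (i + 1, left, right ++ [plates.getD i 0], leftSum, rightSum + plates.getD i 0)]))
              = childrenOf plates start left right leftSum rightSum := rfl
          have hwc : stackW plates.length (childrenOf plates start left right leftSum rightSum)
              = 3 ^ (plates.length - start) - 1 := by
            have := stackW_children plates (plates.length - start) start left right leftSum rightSum
              (by omega)
            rw [← this]; rfl
          have hWapp : stackW plates.length
              (childrenOf plates start left right leftSum rightSum ++ rest)
              = stackW plates.length (childrenOf plates start left right leftSum rightSum)
                + stackW plates.length rest := by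
            simp [stackW]
          rw [List.nil_append, hch, ih _ res (by rw [hWapp, hwc]; omega)]
          have hv : stackVal plates (childrenOf plates start left right leftSum rightSum ++ rest)
              = stackVal plates (childrenOf plates start left right leftSum rightSum)
                ++ stackVal plates rest := by
            simp [stackVal]
          rw [hv, ← backtrackingA_expand plates start left right leftSum rightSum hb hs]
          simp [stackVal]

-- ===== VERDICT (by name: the statement is the Claim_ definition above) =====
theorem solve_spec : Claim_equal_solve := by
  intro plates _
  unfold Spec_solve solve solve_alt
  rw [runB_correct plates _ _ _ (by
      simp [stackW]
      calc 3 ^ (plates.length - 0) ≤ 3 ^ (plates.length + 1) :=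
        Nat.pow_le_pow_right (by norm_num) (by omega))]
  simp [stackVal]
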